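-- pv_equiv track=rewrite | github.com/queelius/computational-explorations | src/adversarial_rcop4.py | coprime_kcliques_containing
-- ===== SOURCE A (Python) =====
-- from typing import Dict, FrozenSet, List, Optional, Set, Tuple
--
-- def coprime_kcliques_containing(n: int, k: int, vertex: int,
--                                 adj: Dict[int, Set[int]]) -> List[Tuple[int, ...]]:
--     """
--     Enumerate k-cliques in coprime graph on [n] that contain `vertex`.
--
--     Strategy: find (k-1)-cliques among neighbors of `vertex` that are < vertex
--     (to avoid double-counting), then add vertex.  But we also need neighbors > vertex.
--     Actually, just find all (k-1)-cliques among neighbors of vertex, then prepend.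
--     To avoid duplicates, we enumerate with vertex always at a canonical position.
--     """
--     neighbors = sorted(adj[vertex])
--     # Build sub-adjacency among neighbors
--     sub_adj: Dict[int, Set[int]] = {v: set() for v in neighbors}
--     for v in neighbors:
--         for w in neighbors:
--             if v < w and w in adj[v]:
--                 sub_adj[v].add(w)
--                 sub_adj[w].add(v)
--
--     result: List[Tuple[int, ...]] = []
--
--     def backtrack(partial: List[int], candidates: List[int]):
--         if len(partial) == k - 1:
--             clique = tuple(sorted(partial + [vertex]))
--             result.append(clique)
--             return
--         need = (k - 1) - len(partial)
--         for idx, v in enumerate(candidates):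
--             if len(candidates) - idx < need:
--                 break
--             if all(v in sub_adj[u] for u in partial):
--                 new_cand = [w for w in candidates[idx + 1:] if w in sub_adj[v]]
--                 backtrack(partial + [v], new_cand)
--
--     backtrack([], neighbors)
--     return result
-- ===== SOURCE B (Python) =====
-- import itertools
-- from typing import Dict, List, Set, Tuple
--
--
-- def coprime_kcliques_containing(n: int, k: int, vertex: int,
--                                 adj: Dict[int, Set[int]]) -> List[Tuple[int, ...]]:
--     """Flat enumeration: build the edge set of the subgraph induced on
--     vertex's sorted neighbors, then keep the (k-1)-combinations of the
--     neighbors that are pairwise adjacent, instead of pruned backtracking."""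
--     neighbors = sorted(adj[vertex])
--     edges = {(v, w) for v, w in itertools.combinations(neighbors, 2) if w in adj[v]}
--     if k - 1 < 0:
--         return []
--     return [tuple(sorted(combo + (vertex,)))
--             for combo in itertools.combinations(neighbors, k - 1)
--             if all(p in edges for p in itertools.combinations(combo, 2))]
-- ===== Notes on version B (the rewrite author's own statement) =====
-- stated objective: simpler
-- what changed: Replaces the dict-of-sets sub-adjacency plus pruned recursive backtracking with a flat pass: an edge set of the neighbor-induced subgraph built by one comprehension, then itertools.combinations of the sorted neighbors filtered for pairwise membership in that set.
import Mathlib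
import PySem

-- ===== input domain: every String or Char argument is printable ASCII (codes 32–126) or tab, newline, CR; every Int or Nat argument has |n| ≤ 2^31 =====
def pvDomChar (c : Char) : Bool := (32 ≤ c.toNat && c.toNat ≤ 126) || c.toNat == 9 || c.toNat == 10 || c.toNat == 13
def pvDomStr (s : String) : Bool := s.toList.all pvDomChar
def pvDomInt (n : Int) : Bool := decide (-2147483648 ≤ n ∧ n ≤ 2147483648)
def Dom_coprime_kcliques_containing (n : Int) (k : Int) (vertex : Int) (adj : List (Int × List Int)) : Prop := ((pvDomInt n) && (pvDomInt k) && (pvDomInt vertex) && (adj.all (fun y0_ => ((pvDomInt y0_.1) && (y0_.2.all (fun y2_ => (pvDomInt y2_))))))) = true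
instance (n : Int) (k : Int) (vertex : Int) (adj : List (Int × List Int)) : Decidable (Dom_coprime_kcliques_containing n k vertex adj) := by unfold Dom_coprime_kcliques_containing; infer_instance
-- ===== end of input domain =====

-- B replaces A's pruned recursive backtracking over a precomputed symmetric sub-adjacency dict
-- by a flat generate-combinations-and-filter pass over the raw adjacency (objective: simpler).

-- ===== PORT A =====
-- sub_adj = {v: set() for v in neighbors}; then the double loop adding both directions
def pvSubAdjA (adjD : PySem.Dict Int (List Int)) (nb : List Int) : PySem.Dict Int (List Int) :=
  nb.foldl
    (fun d v =>
      nb.foldl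
        (fun d' w =>
          if v < w && (adjD.getD v []).contains w then
            (d'.modify v [] (fun s => PySem.Set.add s w)).modify w [] (fun s => PySem.Set.add s v)
          else d')
        d)
    (nb.foldl (fun d v => d.insert v ([] : List Int)) PySem.Dict.empty)

-- the recursive `backtrack`; the inner `for idx, v in enumerate(candidates)` loop (with its
-- break on `len(candidates) - idx < need`) is rendered as the structural recursion on `cands`
def pvBacktrackA (k vertex : Int) (sub : PySem.Dict Int (List Int))
    (part : List Int) (cands : List Int) : List (List Int) :=
    if (part.length : Int) = k - 1 then
      [PySem.List.sorted (part ++ [vertex]) (fun x => x)]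
    else
      match cands with
      | [] => []
      | v :: rest =>
        if ((rest.length : Int) + 1) < (k - 1) - (part.length : Int) then []
        else
          (if part.all (fun u => (sub.getD u []).contains v) then
            pvBacktrackA k vertex sub (part ++ [v])
              (rest.filter (fun w => (sub.getD v []).contains w))
          else []) ++ pvBacktrackA k vertex sub part rest
  termination_by cands.length
  decreasing_by
  · calc (rest.attach.filter _).unattach.length ≤ rest.attach.length := by
          rw [List.length_unattach]; exact List.length_filter_le _ _
        _ < (v :: rest).length := by simp
  · exact Nat.lt_succ_self _

def coprime_kcliques_containing (n : Int) (k : Int) (vertex : Int) (adj : List (Int × List Int)) : List (List Int) :=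
  let adjD := PySem.Dict.mk adj
  let neighbors := PySem.List.sorted (PySem.Set.ofList (adjD.getD vertex [])) (fun x => x)
  pvBacktrackA k vertex (pvSubAdjA adjD neighbors) [] neighbors

-- ===== PORT B =====
-- {(v, w) for v, w in itertools.combinations(neighbors, 2) if w in adj[v]}
-- (hand-ported: the set comprehension is set() grown by adding each generated pair in order,
--  which is exactly PySem.Set.add folded over the generator; the wildcard arm is unreachable
--  because combinations(_, 2) yields only pairs)
def pvEdgesB (adjD : PySem.Dict Int (List Int)) (nb : List Int) : PySem.Set (Int × Int) :=
  (PySem.List.combinations nb 2).foldl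
    (fun e c =>
      match c with
      | [v, w] => if (adjD.getD v []).contains w then PySem.Set.add e (v, w) else e
      | _ => e)
    PySem.Set.empty

-- all(p in edges for p in itertools.combinations(combo, 2))
def pvPairAdjB (edges : PySem.Set (Int × Int)) : List Int → Bool
  | [] => true
  | a :: rest => rest.all (fun b => edges.contains (a, b)) && pvPairAdjB edges rest

def coprime_kcliques_containing_alt (n : Int) (k : Int) (vertex : Int) (adj : List (Int × List Int)) : List (List Int) :=
  let adjD := PySem.Dict.mk adj
  let neighbors := PySem.List.sorted (PySem.Set.ofList (adjD.getD vertex [])) (fun x => x)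
  let edges := pvEdgesB adjD neighbors
  if k - 1 < 0 then []
  else
    ((PySem.List.combinations neighbors (k - 1).toNat).filter (pvPairAdjB edges)).map
      (fun c => PySem.List.sorted (c ++ [vertex]) (fun x => x))

-- ===== PRECONDITION & SPEC =====
-- Pre_ excludes exactly the inputs on which Python A raises KeyError: `vertex` must be a key of
-- `adj`, and every non-maximal neighbor of `vertex` (one with a strictly larger fellow neighbor)
-- must be a key of `adj` — the short-circuit in `if v < w and w in adj[v]` never looks up the
-- maximal neighbor.
def Pre_coprime_kcliques_containing (n : Int) (k : Int) (vertex : Int) (adj : List (Int × List Int)) : Prop :=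
  vertex ∈ adj.map Prod.fst ∧
    ∀ w ∈ ((PySem.Dict.mk adj).getD vertex []),
      (∃ w' ∈ ((PySem.Dict.mk adj).getD vertex []), w < w') → w ∈ adj.map Prod.fst
instance (n : Int) (k : Int) (vertex : Int) (adj : List (Int × List Int)) : Decidable (Pre_coprime_kcliques_containing n k vertex adj) := by unfold Pre_coprime_kcliques_containing; infer_instance

def pvWitness_coprime_kcliques_containing : Int × Int × Int × (List (Int × List Int)) :=
  (5, 3, 1, [(1, [2, 3, 4]), (2, [1, 3]), (3, [1, 2, 4]), (4, [1, 3])])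

def Spec_coprime_kcliques_containing (n : Int) (k : Int) (vertex : Int) (adj : List (Int × List Int)) (out : List (List Int)) : Prop := out = coprime_kcliques_containing_alt n k vertex adj
instance (n : Int) (k : Int) (vertex : Int) (adj : List (Int × List Int)) (out : List (List Int)) : Decidable (Spec_coprime_kcliques_containing n k vertex adj out) := by unfold Spec_coprime_kcliques_containing; infer_instance

-- ===== CLAIM (what is proved, stated in full; the proofs are below) =====
def Claim_equal_coprime_kcliques_containing : Prop := ∀ (n : Int) (k : Int) (vertex : Int) (adj : List (Int × List Int)), Dom_coprime_kcliques_containing n k vertex adj → Pre_coprime_kcliques_containing n k vertex adj → Spec_coprime_kcliques_containing n k vertex adj (coprime_kcliques_containing n k vertex adj)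

-- ===== LEMMAS AND PROOFS =====

-- the initial dict {v: set() for v in neighbors} has only empty values
lemma pv_init_getD (vs : List Int) (d : PySem.Dict Int (List Int))
    (h : ∀ x, d.getD x [] = []) (a : Int) :
    ((vs.foldl (fun d v => d.insert v ([] : List Int)) d).getD a []) = [] := by
  induction vs generalizing d with
  | nil => exact h a
  | cons v vs ih =>
      refine ih _ (fun x => ?_)
      by_cases hx : x = v
      · subst hx; exact PySem.Dict.getD_insert_self _ _ _ _
      · rw [PySem.Dict.getD_insert_of_ne _ _ _ hx]; exact h x

-- membership after the inner loop `for w in neighbors: …`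
lemma pv_inner_char (adjD : PySem.Dict Int (List Int)) (ws : List Int)
    (d : PySem.Dict Int (List Int)) (v a b : Int) :
    (b ∈ ((ws.foldl
        (fun d' w =>
          if v < w && (adjD.getD v []).contains w then
            (d'.modify v [] (fun s => PySem.Set.add s w)).modify w [] (fun s => PySem.Set.add s v)
          else d') d).getD a [])
      ↔ b ∈ d.getD a [] ∨ ∃ w ∈ ws, (v < w && (adjD.getD v []).contains w) = true ∧
          ((v = a ∧ w = b) ∨ (w = a ∧ v = b))) := by
  induction ws generalizing d with
  | nil => simp
  | cons w ws ih =>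
    rw [List.foldl_cons, ih]
    have hstep : b ∈ ((if v < w && (adjD.getD v []).contains w then
        (d.modify v [] (fun s => PySem.Set.add s w)).modify w [] (fun s => PySem.Set.add s v)
        else d).getD a [])
        ↔ b ∈ d.getD a [] ∨ ((v < w && (adjD.getD v []).contains w) = true ∧
            ((v = a ∧ w = b) ∨ (w = a ∧ v = b))) := by
      by_cases hc : (v < w && (adjD.getD v []).contains w) = true
      · rw [if_pos hc]
        have hvw : v < w := by
          have := (Bool.and_eq_true _ _).mp hc
          exact of_decide_eq_true this.1
        by_cases haw : a = w
        · subst haw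
          rw [PySem.Dict.getD_modify_self,
            PySem.Dict.getD_modify_of_ne _ _ _ (by omega : a ≠ v), PySem.Set.mem_add]
          constructor
          · rintro (h | rfl)
            · exact Or.inl h
            · exact Or.inr ⟨hc, Or.inr ⟨rfl, rfl⟩⟩
          · rintro (h | ⟨-, (⟨rfl, rfl⟩ | ⟨-, rfl⟩)⟩)
            · exact Or.inl h
            · omega
            · exact Or.inr rfl
        · rw [PySem.Dict.getD_modify_of_ne _ _ _ haw]
          by_cases hav : a = v
          · subst hav
            rw [PySem.Dict.getD_modify_self, PySem.Set.mem_add]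
            constructor
            · rintro (h | rfl)
              · exact Or.inl h
              · exact Or.inr ⟨hc, Or.inl ⟨rfl, rfl⟩⟩
            · rintro (h | ⟨-, (⟨-, rfl⟩ | ⟨h1, rfl⟩)⟩)
              · exact Or.inl h
              · exact Or.inr rfl
              · exact absurd h1.symm haw
          · rw [PySem.Dict.getD_modify_of_ne _ _ _ hav]
            constructor
            · exact Or.inl
            · rintro (h | ⟨-, (⟨rfl, rfl⟩ | ⟨rfl, rfl⟩)⟩)
              · exact h
              · exact absurd rfl hav
              · exact absurd rfl haw
      · rw [if_neg hc]
        constructor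
        · exact Or.inl
        · rintro (h | ⟨hC, -⟩)
          · exact h
          · exact absurd hC hc
    rw [hstep]
    simp only [List.mem_cons]
    constructor
    · rintro ((h | ⟨hC, hp⟩) | ⟨x, hx, hP⟩)
      · exact Or.inl h
      · exact Or.inr ⟨w, Or.inl rfl, hC, hp⟩
      · exact Or.inr ⟨x, Or.inr hx, hP⟩
    · rintro (h | ⟨x, (rfl | hx), hP⟩)
      · exact Or.inl (Or.inl h)
      · exact Or.inl (Or.inr hP)
      · exact Or.inr ⟨x, hx, hP⟩

-- membership after the outer loop `for v in neighbors: …`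
lemma pv_outer_char (adjD : PySem.Dict Int (List Int)) (nb : List Int) (vs : List Int)
    (d : PySem.Dict Int (List Int)) (a b : Int) :
    (b ∈ ((vs.foldl
        (fun d v => nb.foldl
          (fun d' w =>
            if v < w && (adjD.getD v []).contains w then
              (d'.modify v [] (fun s => PySem.Set.add s w)).modify w []
                (fun s => PySem.Set.add s v)
            else d') d) d).getD a [])
      ↔ b ∈ d.getD a [] ∨ ∃ v ∈ vs, ∃ w ∈ nb,
          (v < w && (adjD.getD v []).contains w) = true ∧
          ((v = a ∧ w = b) ∨ (w = a ∧ v = b))) := by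
  induction vs generalizing d with
  | nil => simp
  | cons v vs ih =>
    rw [List.foldl_cons, ih, pv_inner_char adjD nb d v a b]
    simp only [List.mem_cons]
    constructor
    · rintro ((h | ⟨w, hw, hP⟩) | ⟨x, hx, hP⟩)
      · exact Or.inl h
      · exact Or.inr ⟨v, Or.inl rfl, w, hw, hP⟩
      · exact Or.inr ⟨x, Or.inr hx, hP⟩
    · rintro (h | ⟨x, (rfl | hx), hP⟩)
      · exact Or.inl (Or.inl h)
      · exact Or.inl (Or.inr hP)
      · exact Or.inr ⟨x, hx, hP⟩

-- membership after the whole double loop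
lemma pv_subadj_char (adjD : PySem.Dict Int (List Int)) (nb : List Int) (a b : Int) :
    (b ∈ ((pvSubAdjA adjD nb).getD a []) ↔
      ∃ v ∈ nb, ∃ w ∈ nb, v < w ∧ (adjD.getD v []).contains w = true ∧
        ((v = a ∧ w = b) ∨ (w = a ∧ v = b))) := by
  unfold pvSubAdjA
  rw [pv_outer_char, pv_init_getD nb _ (fun x => rfl) a]
  simp only [List.not_mem_nil, false_or, Bool.and_eq_true, decide_eq_true_eq]
  constructor
  · rintro ⟨v, hv, w, hw, ⟨h1, h2⟩, hp⟩
    exact ⟨v, hv, w, hw, h1, h2, hp⟩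
  · rintro ⟨v, hv, w, hw, h1, h2, hp⟩
    exact ⟨v, hv, w, hw, ⟨h1, h2⟩, hp⟩

-- on an ordered pair of neighbors, sub_adj membership is exactly raw adjacency
lemma pv_sub_eq_adj (adjD : PySem.Dict Int (List Int)) (nb : List Int) {a b : Int}
    (ha : a ∈ nb) (hb : b ∈ nb) (hab : a < b) :
    ((pvSubAdjA adjD nb).getD a []).contains b = (adjD.getD a []).contains b := by
  cases hx : (adjD.getD a []).contains b with
  | true =>
    exact List.contains_iff_mem.mpr ((pv_subadj_char adjD nb a b).mpr
      ⟨a, ha, b, hb, hab, hx, Or.inl ⟨rfl, rfl⟩⟩)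
  | false =>
    cases hy : ((pvSubAdjA adjD nb).getD a []).contains b with
    | false => rfl
    | true =>
      obtain ⟨v, -, w, -, hvw, hC, (⟨rfl, rfl⟩ | ⟨rfl, rfl⟩)⟩ :=
        (pv_subadj_char adjD nb a b).mp (List.contains_iff_mem.mp hy)
      · rw [hC] at hx; exact hx
      · omega

-- combinations of a filtered list = combinations whose every element passes the filter
lemma pv_combinations_filter {α : Type} (p : α → Bool) (xs : List α) (r : Nat) :
    PySem.List.combinations (xs.filter p) r
      = (PySem.List.combinations xs r).filter (fun c => c.all p) := by
  induction xs generalizing r with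
  | nil => cases r <;> simp [PySem.List.combinations_zero, PySem.List.combinations_nil_succ]
  | cons x xs ih =>
    cases r with
    | zero => simp [PySem.List.combinations_zero]
    | succ r =>
      by_cases hp : p x
      · simp only [List.filter_cons, hp, if_pos, PySem.List.combinations_cons_succ,
          List.filter_append, List.filter_map, ih]
        simp [Function.comp_def, hp]
      · rw [List.filter_cons_of_neg (by simpa using hp), ih,
          PySem.List.combinations_cons_succ, List.filter_append, List.filter_map]
        simp [Function.comp_def, hp]

-- A's pairwise-adjacency chain over the sub-adjacency dict (proof-side shorthand for the
-- conjunction of membership tests A's backtracking performs along a combination)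
def pvChainA (sd : PySem.Dict Int (List Int)) : List Int → Bool
  | [] => true
  | a :: rest => rest.all (fun b => (sd.getD a []).contains b) && pvChainA sd rest

-- A's backtracking = filtered combinations (core invariant)
lemma pv_backtrack_eq (k vertex : Int) (sd : PySem.Dict Int (List Int)) :
    ∀ (N : Nat) (cands : List Int), cands.length ≤ N →
    ∀ (d : Nat) (part : List Int), (part.length : Int) + d = k - 1 →
      pvBacktrackA k vertex sd part cands =
        ((PySem.List.combinations cands d).filter
            (fun c => c.all (fun v => part.all (fun u => (sd.getD u []).contains v))
                        && pvChainA sd c)).map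
          (fun c => PySem.List.sorted (part ++ c ++ [vertex]) (fun x => x)) := by
  intro N
  induction N with
  | zero =>
    intro cands hle d part h
    obtain rfl : cands = [] := List.eq_nil_of_length_eq_zero (Nat.le_zero.mp hle)
    cases d with
    | zero =>
      rw [pvBacktrackA.eq_def, if_pos (by omega)]
      simp [PySem.List.combinations_zero, pvChainA]
    | succ d =>
      rw [pvBacktrackA.eq_def, if_neg (by omega)]
      simp [PySem.List.combinations_nil_succ]
  | succ N ih =>
    intro cands hle d part h
    cases d with
    | zero =>
      rw [pvBacktrackA.eq_def, if_pos (by omega)]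
      simp [PySem.List.combinations_zero, pvChainA]
    | succ d =>
      rw [pvBacktrackA.eq_def, if_neg (by omega)]
      cases cands with
      | nil => simp [PySem.List.combinations_nil_succ]
      | cons v rest =>
        have hlerest : rest.length ≤ N := by simpa using hle
        simp only []
        by_cases hbrk : ((rest.length : Int) + 1) < (k - 1) - (part.length : Int)
        · rw [if_pos hbrk, PySem.List.combinations_cons_succ,
            PySem.List.combinations_eq_nil_of_length_lt rest (by omega : rest.length < d),
            PySem.List.combinations_eq_nil_of_length_lt rest (by omega : rest.length < d + 1)]
          simp
        · rw [if_neg hbrk, PySem.List.combinations_cons_succ, List.filter_append,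
            List.map_append]
          congr 1
          · rw [List.filter_map, List.map_map]
            by_cases hchk : part.all (fun u => (sd.getD u []).contains v) = true
            · rw [if_pos hchk,
                ih _ (le_trans (List.length_filter_le _ _) hlerest) d (part ++ [v])
                  (by simp; omega),
                pv_combinations_filter, List.filter_filter]
              rw [List.filter_congr (fun c _ => ?_ :
                ∀ c ∈ PySem.List.combinations rest d, _ = ((fun c => (c.all fun v =>
                  part.all fun u => (sd.getD u []).contains v) && pvChainA sd c) ∘
                  (fun c => v :: c)) c)]
              · exact List.map_congr_left (fun c _ => by
                  rw [Function.comp_apply, show part ++ [v] ++ c = part ++ v :: c by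
                    rw [List.append_assoc, List.singleton_append]])
              · apply Bool.eq_iff_iff.mpr
                simp only [Function.comp_def, pvChainA, List.all_cons, List.all_append,
                  List.all_eq_true, Bool.and_eq_true, List.all_nil, hchk]
                exact ⟨fun ⟨⟨h1, h2⟩, h3⟩ => ⟨⟨trivial, fun x hx => (h1 x hx).1⟩, h3, h2⟩,
                  fun ⟨⟨_, h1⟩, h2, h3⟩ => ⟨⟨fun x hx => ⟨h1 x hx, h2 x hx, trivial⟩, h3⟩, h2⟩⟩
            · rw [if_neg hchk]
              have hfalse : ∀ c ∈ PySem.List.combinations rest d,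
                  ((fun c => (c.all fun v => part.all fun u => (sd.getD u []).contains v)
                    && pvChainA sd c) ∘ (fun c => v :: c)) c = false := by
                intro c _
                have hf : (part.all fun u => (sd.getD u []).contains v) = false := by
                  cases hx : part.all fun u => (sd.getD u []).contains v
                  · rfl
                  · exact absurd hx hchk
                simp only [Function.comp_apply, List.all_cons, hf, Bool.false_and]
              rw [List.filter_congr hfalse]
              simp
          · exact ih rest hlerest (d + 1) part h

-- when k - 1 < len(partial) the backtracking returns []
lemma pv_backtrack_neg (k vertex : Int) (sd : PySem.Dict Int (List Int)) :
    ∀ (N : Nat) (cands : List Int), cands.length ≤ N →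
    ∀ (part : List Int), (k - 1 : Int) < part.length →
      pvBacktrackA k vertex sd part cands = [] := by
  intro N
  induction N with
  | zero =>
    intro cands hle part h
    obtain rfl : cands = [] := List.eq_nil_of_length_eq_zero (Nat.le_zero.mp hle)
    rw [pvBacktrackA.eq_def, if_neg (by omega)]
  | succ N ih =>
    intro cands hle part h
    rw [pvBacktrackA.eq_def, if_neg (by omega : ¬ ((part.length : Int) = k - 1))]
    cases cands with
    | nil => rfl
    | cons v rest =>
      simp only []
      split_ifs with hbrk hchk
      · rfl
      · rw [ih _ (by
            calc (rest.filter _).length ≤ rest.length := List.length_filter_le _ _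
              _ ≤ N := by simpa using hle) _ (by simp; omega),
          ih rest (by simpa using hle) part h]
        rfl
      · rw [ih rest (by simpa using hle) part h]
        rfl

-- a strictly increasing pair of members of a strictly increasing list is a sublist of it
lemma pv_pair_sublist {nb : List Int} (h : nb.Pairwise (· < ·)) {a b : Int}
    (ha : a ∈ nb) (hb : b ∈ nb) (hab : a < b) : [a, b].Sublist nb := by
  induction nb with
  | nil => cases ha
  | cons x t ih =>
    have hx := List.pairwise_cons.mp h
    rcases List.mem_cons.mp ha with rfl | hat
    · have hbt : b ∈ t := by
        rcases List.mem_cons.mp hb with rfl | h'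
        · omega
        · exact h'
      exact List.Sublist.cons₂ a (List.singleton_sublist.mpr hbt)
    · rcases List.mem_cons.mp hb with rfl | hbt
      · have := hx.1 a hat
        omega
      · exact (ih hx.2 hat hbt).cons x

-- membership in the edge set built by B's comprehension loop
lemma pv_edges_mem (adjD : PySem.Dict Int (List Int)) :
    ∀ (cs : List (List Int)), (∀ c ∈ cs, c.length = 2) →
    ∀ (e : PySem.Set (Int × Int)) (x : Int × Int),
    (x ∈ cs.foldl (fun e c => match c with
        | [v, w] => if (adjD.getD v []).contains w then PySem.Set.add e (v, w) else e
        | _ => e) e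
      ↔ x ∈ e ∨ ∃ v w, [v, w] ∈ cs ∧ (adjD.getD v []).contains w = true ∧ x = (v, w)) := by
  intro cs
  induction cs with
  | nil => simp
  | cons c cs ih =>
    intro hlen e x
    obtain ⟨v, w, rfl⟩ : ∃ v w, c = [v, w] := by
      have h2 := hlen c List.mem_cons_self
      match c, h2 with
      | [v, w], _ => exact ⟨v, w, rfl⟩
    rw [List.foldl_cons, ih (fun c hc => hlen c (List.mem_cons_of_mem _ hc))]
    have hstep : (x ∈ (if (adjD.getD v []).contains w then PySem.Set.add e (v, w) else e))
        ↔ x ∈ e ∨ ((adjD.getD v []).contains w = true ∧ x = (v, w)) := by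
      by_cases hc : (adjD.getD v []).contains w = true
      · rw [if_pos hc, PySem.Set.mem_add]
        tauto
      · rw [if_neg hc]
        tauto
    rw [hstep]
    constructor
    · rintro ((h | ⟨h1, rfl⟩) | ⟨v', w', hm, h1, rfl⟩)
      · exact Or.inl h
      · exact Or.inr ⟨v, w, List.mem_cons_self, h1, rfl⟩
      · exact Or.inr ⟨v', w', List.mem_cons_of_mem _ hm, h1, rfl⟩
    · rintro (h | ⟨v', w', hm, h1, rfl⟩)
      · exact Or.inl (Or.inl h)
      · rcases List.mem_cons.mp hm with heq | hm'
        · obtain ⟨rfl, rfl⟩ : v' = v ∧ w' = w := by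
            simpa using heq
          exact Or.inl (Or.inr ⟨h1, rfl⟩)
        · exact Or.inr ⟨v', w', hm', h1, rfl⟩

-- on an ordered pair of neighbors, edge-set membership is exactly raw adjacency
lemma pv_edge_contains (adjD : PySem.Dict Int (List Int)) (nb : List Int)
    (h : nb.Pairwise (· < ·)) {a b : Int} (ha : a ∈ nb) (hb : b ∈ nb) (hab : a < b) :
    (pvEdgesB adjD nb).contains (a, b) = (adjD.getD a []).contains b := by
  have hlen : ∀ c ∈ PySem.List.combinations nb 2, c.length = 2 := fun c hc =>
    PySem.List.length_of_mem_combinations hc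
  unfold pvEdgesB
  cases hx : (adjD.getD a []).contains b with
  | true =>
    apply List.contains_iff_mem.mpr
    apply (pv_edges_mem adjD _ hlen _ _).mpr
    exact Or.inr ⟨a, b,
      (PySem.List.mem_combinations_iff _ _ _).mpr ⟨pv_pair_sublist h ha hb hab, rfl⟩, hx, rfl⟩
  | false =>
    cases hy : ((PySem.List.combinations nb 2).foldl
        (fun e c => match c with
          | [v, w] => if (adjD.getD v []).contains w then PySem.Set.add e (v, w) else e
          | _ => e) PySem.Set.empty).contains (a, b) with
    | false => rfl
    | true =>
      obtain ⟨v, w, -, h1, heq⟩ := ((pv_edges_mem adjD _ hlen _ _).mp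
        (List.contains_iff_mem.mp hy)).resolve_left (by simp [PySem.Set.empty])
      obtain ⟨rfl, rfl⟩ : a = v ∧ b = w := by simpa using heq
      rw [h1] at hx
      exact hx

-- the two filter predicates agree on any strictly increasing list of neighbors
lemma pv_chain_eq (adjD : PySem.Dict Int (List Int)) (nb : List Int)
    (hnb : nb.Pairwise (· < ·)) :
    ∀ (c : List Int), c.Pairwise (· < ·) → (∀ x ∈ c, x ∈ nb) →
      pvChainA (pvSubAdjA adjD nb) c = pvPairAdjB (pvEdgesB adjD nb) c := by
  intro c hp hmem
  induction c with
  | nil => rfl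
  | cons a c ih =>
    have hlt := List.pairwise_cons.mp hp
    have hpt : ∀ b ∈ c, ((pvSubAdjA adjD nb).getD a []).contains b
        = (pvEdgesB adjD nb).contains (a, b) := fun b hb => by
      rw [pv_sub_eq_adj adjD nb (hmem a List.mem_cons_self)
          (hmem b (List.mem_cons_of_mem a hb)) (hlt.1 b hb),
        pv_edge_contains adjD nb hnb (hmem a List.mem_cons_self)
          (hmem b (List.mem_cons_of_mem a hb)) (hlt.1 b hb)]
    have hall : (c.all fun b => ((pvSubAdjA adjD nb).getD a []).contains b)
        = c.all fun b => (pvEdgesB adjD nb).contains (a, b) := by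
      apply Bool.eq_iff_iff.mpr
      simp only [List.all_eq_true]
      exact ⟨fun h b hb => (hpt b hb) ▸ h b hb, fun h b hb => (hpt b hb).symm ▸ h b hb⟩
    rw [pvChainA, pvPairAdjB, ih hlt.2 (fun x hx => hmem x (List.mem_cons_of_mem a hx)), hall]

-- ===== VERDICT (by name: the statement is the Claim_ definition above) =====
theorem coprime_kcliques_containing_spec : Claim_equal_coprime_kcliques_containing := by
  intro n k vertex adj _ _
  unfold Spec_coprime_kcliques_containing coprime_kcliques_containing
    coprime_kcliques_containing_alt
  by_cases hk : k - 1 < 0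
  · rw [if_pos hk]
    exact pv_backtrack_neg k vertex _ _ _ le_rfl [] (by simpa using hk)
  · rw [if_neg hk]
    set adjD := PySem.Dict.mk adj with hadj
    set nb := PySem.List.sorted (PySem.Set.ofList (adjD.getD vertex [])) (fun x => x) with hnbd
    rw [pv_backtrack_eq k vertex (pvSubAdjA adjD nb) nb.length nb le_rfl (k - 1).toNat []
      (by simp; omega)]
    have hnb : nb.Pairwise (· < ·) := PySem.List.sorted_ofList_pairwise_lt _
    rw [List.filter_congr (fun c hc => ?_)]
    · exact List.map_congr_left (fun c _ => by rw [List.nil_append])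
    · have hsub := PySem.List.sublist_of_mem_combinations hc
      have hpw : c.Pairwise (· < ·) := hnb.sublist hsub
      rw [show (c.all fun v => ([] : List Int).all fun u =>
            ((pvSubAdjA adjD nb).getD u []).contains v) = true from by simp,
        Bool.true_and, pv_chain_eq adjD nb hnb c hpw (fun x hx => hsub.subset hx)]
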